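-- pv_equiv track=rewrite | github.com/ChristopheYe/textgrad | experiments/utils_functions.py | get_word_indices
-- ===== SOURCE A (Python) =====
-- def get_word_indices(doc, offsets):
--     words = doc.split()
--     char_count = 0
--     start_char, end_char = offsets
--     start_word_idx = None
--     end_word_idx = None
--
--     for idx, word in enumerate(words):
--         word_start = char_count
--         word_end = char_count + len(word)
--
--         if word_start <= start_char < word_end:
--             start_word_idx = idx
--         if word_start < end_char <= word_end:
--             end_word_idx = idx + 1
--
--         char_count = word_end + 1  # +1 for the space
--
--     # If the mention is at the end of the document
--     if end_word_idx is None: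
--         end_word_idx = len(words)
--
--     return start_word_idx, end_word_idx
-- ===== SOURCE B (Python) =====
-- def _bisect_right(a, x):
--     # standard bisect_right (stdlib algorithm, written out since A imports nothing)
--     lo, hi = 0, len(a)
--     while lo < hi:
--         mid = (lo + hi) // 2
--         if x < a[mid]:
--             hi = mid
--         else:
--             lo = mid + 1
--     return lo
--
--
-- def _bisect_left(a, x):
--     lo, hi = 0, len(a)
--     while lo < hi:
--         mid = (lo + hi) // 2
--         if a[mid] < x:
--             lo = mid + 1
--         else:
--             hi = mid
--     return lo
--
--
-- def get_word_indices(doc, offsets):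
--     words = doc.split()
--     starts = []
--     c = 0
--     for w in words:
--         starts.append(c)
--         c += len(w) + 1
--     start_char, end_char = offsets
--     i = _bisect_right(starts, start_char) - 1
--     start_word_idx = i if i >= 0 and start_char < starts[i] + len(words[i]) else None
--     j = _bisect_left(starts, end_char) - 1
--     end_word_idx = j + 1 if j >= 0 and end_char <= starts[j] + len(words[j]) else len(words)
--     return start_word_idx, end_word_idx
-- ===== Notes on version B (the rewrite author's own statement) =====
-- stated objective: alternative
-- what changed: B builds a prefix table of word start offsets in one pass and locates start_char/end_char by binary search (bisect_right/bisect_left) with an explicit boundary check, instead of A's single sweep testing every word against both offsets.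
import Mathlib
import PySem

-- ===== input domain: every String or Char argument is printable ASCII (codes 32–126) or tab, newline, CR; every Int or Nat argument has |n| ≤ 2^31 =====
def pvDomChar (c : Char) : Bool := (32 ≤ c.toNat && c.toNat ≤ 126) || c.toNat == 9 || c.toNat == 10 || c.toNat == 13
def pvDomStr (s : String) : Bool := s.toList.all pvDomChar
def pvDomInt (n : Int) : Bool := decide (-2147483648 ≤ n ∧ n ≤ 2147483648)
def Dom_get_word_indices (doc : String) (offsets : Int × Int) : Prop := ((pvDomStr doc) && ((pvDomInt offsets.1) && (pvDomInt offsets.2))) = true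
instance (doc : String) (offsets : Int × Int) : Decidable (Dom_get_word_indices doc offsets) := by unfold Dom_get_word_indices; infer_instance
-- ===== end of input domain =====

-- B replaces A's per-word sweep by a prefix table of word start offsets plus two binary searches
-- (an alternative decomposition of the same O(n) task; equivalence proved for all inputs).


-- ===== PORT A =====
-- loop body of A's 'for idx, word in enumerate(words)'; state = (char_count, start_word_idx, end_word_idx)
def aStep (start_char end_char : Int) (st : Int × Option Int × Option Int) (iw : Int × String) :
    Int × Option Int × Option Int :=
  let word_start := st.1
  let word_end := st.1 + PySem.Str.len iw.2
  (word_end + 1,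
   if word_start ≤ start_char ∧ start_char < word_end then some iw.1 else st.2.1,
   if word_start < end_char ∧ end_char ≤ word_end then some (iw.1 + 1) else st.2.2)

def get_word_indices (doc : String) (offsets : Int × Int) : Option Int × Int :=
  let words := PySem.Str.split₀ doc
  let st := (PySem.List.enumerate words).foldl (aStep offsets.1 offsets.2) (0, none, none)
  (st.2.1, st.2.2.getD (words.length : Int))

-- ===== PORT B =====
-- loop body of B's starts-building loop; state = (starts, c)
def bStep (st : List Int × Int) (w : String) : List Int × Int :=
  (st.1 ++ [st.2], st.2 + PySem.Str.len w + 1)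

-- Source B's hand-written _bisect_right/_bisect_left are exactly the stdlib bisect algorithm,
-- ported as the PySem primitives PySem.List.bisectRight / bisectLeft (same loop, same midpoints).
def get_word_indices_alt (doc : String) (offsets : Int × Int) : Option Int × Int :=
  let words := PySem.Str.split₀ doc
  let starts := (words.foldl bStep ([], 0)).1
  let i : Int := (PySem.List.bisectRight starts offsets.1 : Int) - 1
  let start_word_idx :=
    if 0 ≤ i ∧ offsets.1 < PySem.List.pyGetD starts i 0 + PySem.Str.len (PySem.List.pyGetD words i "")
    then some i else none
  let j : Int := (PySem.List.bisectLeft starts offsets.2 : Int) - 1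
  let end_word_idx :=
    if 0 ≤ j ∧ offsets.2 ≤ PySem.List.pyGetD starts j 0 + PySem.Str.len (PySem.List.pyGetD words j "")
    then j + 1 else (words.length : Int)
  (start_word_idx, end_word_idx)

-- ===== PRECONDITION & SPEC =====
def Spec_get_word_indices (doc : String) (offsets : Int × Int) (out : Option Int × Int) : Prop := out = get_word_indices_alt doc offsets
instance (doc : String) (offsets : Int × Int) (out : Option Int × Int) : Decidable (Spec_get_word_indices doc offsets out) := by unfold Spec_get_word_indices; infer_instance

-- ===== CLAIM (what is proved, stated in full; the proofs are below) =====
def Claim_equal_get_word_indices : Prop := ∀ (doc : String) (offsets : Int × Int), Dom_get_word_indices doc offsets → Spec_get_word_indices doc offsets (get_word_indices doc offsets)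

-- ===== LEMMAS AND PROOFS =====

theorem lenNonneg (w : String) : 0 ≤ PySem.Str.len w := by
  simp [PySem.Str.len_eq]

-- the list of start offsets of the words, starting at offset c
def startsOf : List String → Int → List Int
  | [], _ => []
  | w :: ws, c => c :: startsOf ws (c + PySem.Str.len w + 1)

theorem length_startsOf (ws : List String) (c : Int) : (startsOf ws c).length = ws.length := by
  induction ws generalizing c with
  | nil => rfl
  | cons w ws ih => simp [startsOf, ih]

theorem le_of_mem_startsOf (ws : List String) (c : Int) {x : Int} (hx : x ∈ startsOf ws c) : c ≤ x := by
  induction ws generalizing c with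
  | nil => simp [startsOf] at hx
  | cons w ws ih =>
      simp only [startsOf, List.mem_cons] at hx
      rcases hx with h | h
      · omega
      · have := ih (c + PySem.Str.len w + 1) h
        have := lenNonneg w
        omega

theorem pairwise_startsOf (ws : List String) (c : Int) :
    (startsOf ws c).Pairwise (fun a b => a ≤ b) := by
  induction ws generalizing c with
  | nil => simp [startsOf]
  | cons w ws ih =>
      refine List.Pairwise.cons ?_ (ih _)
      intro x hx
      have := le_of_mem_startsOf ws (c + PySem.Str.len w + 1) hx
      have := lenNonneg w
      omega

theorem le_getD_startsOf (ws : List String) (c : Int) (j : Nat) (hj : j < ws.length) :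
    c ≤ (startsOf ws c).getD j 0 := by
  apply le_of_mem_startsOf ws c
  have hl : j < (startsOf ws c).length := by rw [length_startsOf]; exact hj
  rw [List.getD_eq_getElem _ _ hl]
  exact List.getElem_mem hl

theorem startsOf_getD_succ (ws : List String) (c : Int) (j : Nat) (hj : j + 1 < ws.length) :
    (startsOf ws c).getD (j+1) 0
      = (startsOf ws c).getD j 0 + PySem.Str.len (ws.getD j "") + 1 := by
  induction ws generalizing c j with
  | nil => simp at hj
  | cons w ws ih =>
      cases j with
      | zero =>
          cases ws with
          | nil => simp at hj
          | cons w' ws' => simp [startsOf]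
      | succ j =>
          simp only [startsOf, List.getD_cons_succ]
          exact ih (c + PySem.Str.len w + 1) j (by simpa using hj)

theorem startsOf_mono (ws : List String) (c : Int) (j j' : Nat) (hjj : j ≤ j') (hj' : j' < ws.length) :
    (startsOf ws c).getD j 0 ≤ (startsOf ws c).getD j' 0 := by
  rcases Nat.eq_or_lt_of_le hjj with rfl | hlt
  · exact le_refl _
  · have hp := pairwise_startsOf ws c
    rw [List.pairwise_iff_getElem] at hp
    have hl : j' < (startsOf ws c).length := by rw [length_startsOf]; exact hj'
    have hlj : j < (startsOf ws c).length := by omega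
    rw [List.getD_eq_getElem _ _ hlj, List.getD_eq_getElem _ _ hl]
    exact hp j j' hlj hl hlt

theorem startsOf_gap (ws : List String) (c : Int) (j j' : Nat) (hjj : j < j') (hj' : j' < ws.length) :
    (startsOf ws c).getD j 0 + PySem.Str.len (ws.getD j "") + 1 ≤ (startsOf ws c).getD j' 0 := by
  have h1 := startsOf_getD_succ ws c j (by omega)
  have h2 := startsOf_mono ws c (j+1) j' (by omega) hj'
  omega

-- the unique word whose [start, start+len) span contains sc (first match = only match)
def findS (sc : Int) : List String → Int → Int → Option Int
  | [], _, _ => none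
  | w :: ws, c, k =>
      if c ≤ sc ∧ sc < c + PySem.Str.len w then some k
      else findS sc ws (c + PySem.Str.len w + 1) (k+1)

def findE (ec : Int) : List String → Int → Int → Option Int
  | [], _, _ => none
  | w :: ws, c, k =>
      if c < ec ∧ ec ≤ c + PySem.Str.len w then some (k+1)
      else findE ec ws (c + PySem.Str.len w + 1) (k+1)

theorem findS_none_of_lt (sc : Int) (ws : List String) (c k : Int) (h : sc < c) :
    findS sc ws c k = none := by
  induction ws generalizing c k with
  | nil => rfl
  | cons w ws ih =>
      have := lenNonneg w
      simp only [findS]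
      rw [if_neg (by omega)]
      exact ih _ _ (by omega)

theorem findE_none_of_le (ec : Int) (ws : List String) (c k : Int) (h : ec ≤ c) :
    findE ec ws c k = none := by
  induction ws generalizing c k with
  | nil => rfl
  | cons w ws ih =>
      have := lenNonneg w
      simp only [findE]
      rw [if_neg (by omega)]
      exact ih _ _ (by omega)

-- A's fold computes exactly (findS, findE) (overwrites never happen: spans are disjoint)
theorem aFold_eq (sc ec : Int) (ws : List String) (k c : Int) (s0 e0 : Option Int) :
    ((PySem.List.enumerate ws k).foldl (aStep sc ec) (c, s0, e0)).2
      = ((findS sc ws c k).elim s0 some, (findE ec ws c k).elim e0 some) := by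
  induction ws generalizing k c s0 e0 with
  | nil => simp [PySem.List.enumerate_nil, findS, findE]
  | cons w ws ih =>
      rw [PySem.List.enumerate_cons, List.foldl_cons]
      have hlen := lenNonneg w
      simp only [aStep]
      rw [ih]
      simp only [findS, findE]
      by_cases hs : c ≤ sc ∧ sc < c + PySem.Str.len w
      · rw [if_pos hs, if_pos hs,
            findS_none_of_lt sc ws (c + PySem.Str.len w + 1) (k+1) (by omega)]
        by_cases he : c < ec ∧ ec ≤ c + PySem.Str.len w
        · rw [if_pos he, if_pos he,
              findE_none_of_le ec ws (c + PySem.Str.len w + 1) (k+1) (by omega)]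
          simp
        · rw [if_neg he, if_neg he]
          simp
      · rw [if_neg hs, if_neg hs]
        by_cases he : c < ec ∧ ec ≤ c + PySem.Str.len w
        · rw [if_pos he, if_pos he,
              findE_none_of_le ec ws (c + PySem.Str.len w + 1) (k+1) (by omega)]
          simp
        · rw [if_neg he, if_neg he]

theorem findS_eq_some (sc : Int) (ws : List String) (c k : Int) (j : Nat) (hj : j < ws.length)
    (h1 : (startsOf ws c).getD j 0 ≤ sc)
    (h2 : sc < (startsOf ws c).getD j 0 + PySem.Str.len (ws.getD j "")) :
    findS sc ws c k = some (k + j) := by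
  induction ws generalizing c k j with
  | nil => simp at hj
  | cons w ws ih =>
      cases j with
      | zero =>
          simp only [startsOf, List.getD_cons_zero] at h1 h2
          simp only [findS]
          rw [if_pos ⟨h1, by simpa using h2⟩]
          simp
      | succ j =>
          have hj' : j < ws.length := by simpa using hj
          simp only [startsOf, List.getD_cons_succ] at h1 h2
          have hc' := le_getD_startsOf ws (c + PySem.Str.len w + 1) j hj'
          simp only [findS]
          rw [if_neg (by omega)]
          rw [ih _ _ j hj' h1 h2]
          congr 1
          push_cast
          ring

theorem findS_eq_none (sc : Int) (ws : List String) (c k : Int)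
    (h : ∀ j : Nat, j < ws.length →
        ¬((startsOf ws c).getD j 0 ≤ sc ∧
          sc < (startsOf ws c).getD j 0 + PySem.Str.len (ws.getD j ""))) :
    findS sc ws c k = none := by
  induction ws generalizing c k with
  | nil => rfl
  | cons w ws ih =>
      simp only [findS]
      have h0 := h 0 (by simp)
      simp only [startsOf, List.getD_cons_zero] at h0
      rw [if_neg h0]
      apply ih
      intro j hjl
      have := h (j+1) (by simpa using hjl)
      simpa [startsOf] using this

theorem findE_eq_some (ec : Int) (ws : List String) (c k : Int) (j : Nat) (hj : j < ws.length)
    (h1 : (startsOf ws c).getD j 0 < ec)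
    (h2 : ec ≤ (startsOf ws c).getD j 0 + PySem.Str.len (ws.getD j "")) :
    findE ec ws c k = some (k + j + 1) := by
  induction ws generalizing c k j with
  | nil => simp at hj
  | cons w ws ih =>
      cases j with
      | zero =>
          simp only [startsOf, List.getD_cons_zero] at h1 h2
          simp only [findE]
          rw [if_pos ⟨h1, by simpa using h2⟩]
          simp
      | succ j =>
          have hj' : j < ws.length := by simpa using hj
          simp only [startsOf, List.getD_cons_succ] at h1 h2
          have hc' := le_getD_startsOf ws (c + PySem.Str.len w + 1) j hj'
          simp only [findE]
          rw [if_neg (by omega)]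
          rw [ih _ _ j hj' h1 h2]
          congr 1
          push_cast
          ring

theorem findE_eq_none (ec : Int) (ws : List String) (c k : Int)
    (h : ∀ j : Nat, j < ws.length →
        ¬((startsOf ws c).getD j 0 < ec ∧
          ec ≤ (startsOf ws c).getD j 0 + PySem.Str.len (ws.getD j ""))) :
    findE ec ws c k = none := by
  induction ws generalizing c k with
  | nil => rfl
  | cons w ws ih =>
      simp only [findE]
      have h0 := h 0 (by simp)
      simp only [startsOf, List.getD_cons_zero] at h0
      rw [if_neg h0]
      apply ih
      intro j hjl
      have := h (j+1) (by simpa using hjl)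
      simpa [startsOf] using this

theorem bFold_eq (ws : List String) (acc : List Int) (c : Int) :
    (ws.foldl bStep (acc, c)).1 = acc ++ startsOf ws c := by
  induction ws generalizing acc c with
  | nil => simp [startsOf]
  | cons w ws ih =>
      simp only [List.foldl_cons, bStep, startsOf]
      rw [ih]
      simp

-- binary-search side, start offset
theorem findS_eq_bisect (ws : List String) (sc : Int) :
    findS sc ws 0 0
      = (if 0 ≤ (PySem.List.bisectRight (startsOf ws 0) sc : Int) - 1 ∧
            sc < PySem.List.pyGetD (startsOf ws 0) ((PySem.List.bisectRight (startsOf ws 0) sc : Int) - 1) 0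
                 + PySem.Str.len (PySem.List.pyGetD ws ((PySem.List.bisectRight (startsOf ws 0) sc : Int) - 1) "")
         then some ((PySem.List.bisectRight (startsOf ws 0) sc : Int) - 1) else none) := by
  set s := startsOf ws 0 with hsdef
  have hsl : s.length = ws.length := length_startsOf ws 0
  obtain ⟨hr, hlow, hhigh⟩ := PySem.List.bisectRight_spec s sc (pairwise_startsOf ws 0)
  set r := PySem.List.bisectRight s sc with hrdef
  by_cases hr0 : r = 0
  · rw [if_neg (by rintro ⟨h1, -⟩; omega)]
    apply findS_eq_none
    intro j hj
    have hj' : j < s.length := by omega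
    have hsc := hhigh j hj' (by omega)
    rw [List.getD_eq_getElem _ _ hj']
    rintro ⟨h1, -⟩; omega
  · have hr1 : 1 ≤ r := Nat.one_le_iff_ne_zero.mpr hr0
    have hrn : r - 1 < ws.length := by omega
    have hin : ((r : Int) - 1) = ((r - 1 : Nat) : Int) := by omega
    have hget : PySem.List.pyGetD s ((r : Int) - 1) 0 = s.getD (r - 1) 0 := by
      rw [hin, PySem.List.pyGetD_natCast]
    have hgetw : PySem.List.pyGetD ws ((r : Int) - 1) "" = ws.getD (r - 1) "" := by
      rw [hin, PySem.List.pyGetD_natCast]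
    have hs1 : s.getD (r - 1) 0 ≤ sc := by
      have h := hlow (r - 1) (by omega) (by omega)
      rw [List.getD_eq_getElem _ _ (by omega)]; exact h
    rw [hget, hgetw]
    split_ifs with hcond
    · rw [findS_eq_some sc ws 0 0 (r - 1) hrn hs1 hcond.2]
      congr 1
      omega
    · have hcond' : ¬ sc < s.getD (r - 1) 0 + PySem.Str.len (ws.getD (r - 1) "") :=
        fun hc => hcond ⟨by omega, hc⟩
      apply findS_eq_none
      intro j hj
      rw [← hsdef]
      rcases lt_trichotomy j (r - 1) with h | h | h
      · have hgap := startsOf_gap ws 0 j (r - 1) h hrn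
        rw [← hsdef] at hgap
        rintro ⟨-, hb⟩; omega
      · subst h
        rintro ⟨-, hb⟩; exact hcond' hb
      · have hj' : j < s.length := by omega
        have hsc := hhigh j hj' (by omega)
        rw [List.getD_eq_getElem _ _ hj']
        rintro ⟨ha, -⟩; omega

theorem findE_eq_bisect (ws : List String) (ec : Int) :
    ((findE ec ws 0 0).getD (ws.length : Int))
      = (if 0 ≤ (PySem.List.bisectLeft (startsOf ws 0) ec : Int) - 1 ∧
            ec ≤ PySem.List.pyGetD (startsOf ws 0) ((PySem.List.bisectLeft (startsOf ws 0) ec : Int) - 1) 0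
                 + PySem.Str.len (PySem.List.pyGetD ws ((PySem.List.bisectLeft (startsOf ws 0) ec : Int) - 1) "")
         then (PySem.List.bisectLeft (startsOf ws 0) ec : Int) - 1 + 1 else (ws.length : Int)) := by
  set s := startsOf ws 0 with hsdef
  have hsl : s.length = ws.length := length_startsOf ws 0
  obtain ⟨hr, hlow, hhigh⟩ := PySem.List.bisectLeft_spec s ec (pairwise_startsOf ws 0)
  set r := PySem.List.bisectLeft s ec with hrdef
  by_cases hr0 : r = 0
  · rw [if_neg (by rintro ⟨h1, -⟩; omega)]
    rw [findE_eq_none ec ws 0 0 ?_]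
    · rfl
    intro j hj
    have hj' : j < s.length := by omega
    have hec := hhigh j hj' (by omega)
    rw [List.getD_eq_getElem _ _ hj']
    rintro ⟨h1, -⟩; omega
  · have hr1 : 1 ≤ r := Nat.one_le_iff_ne_zero.mpr hr0
    have hrn : r - 1 < ws.length := by omega
    have hin : ((r : Int) - 1) = ((r - 1 : Nat) : Int) := by omega
    have hget : PySem.List.pyGetD s ((r : Int) - 1) 0 = s.getD (r - 1) 0 := by
      rw [hin, PySem.List.pyGetD_natCast]
    have hgetw : PySem.List.pyGetD ws ((r : Int) - 1) "" = ws.getD (r - 1) "" := by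
      rw [hin, PySem.List.pyGetD_natCast]
    have hs1 : s.getD (r - 1) 0 < ec := by
      have h := hlow (r - 1) (by omega) (by omega)
      rw [List.getD_eq_getElem _ _ (by omega)]; exact h
    rw [hget, hgetw]
    split_ifs with hcond
    · rw [findE_eq_some ec ws 0 0 (r - 1) hrn hs1 hcond.2]
      simp only [Option.getD_some]
      omega
    · have hcond' : ¬ ec ≤ s.getD (r - 1) 0 + PySem.Str.len (ws.getD (r - 1) "") :=
        fun hc => hcond ⟨by omega, hc⟩
      rw [findE_eq_none ec ws 0 0 ?_]
      · rfl
      intro j hj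
      rw [← hsdef]
      rcases lt_trichotomy j (r - 1) with h | h | h
      · have hgap := startsOf_gap ws 0 j (r - 1) h hrn
        rw [← hsdef] at hgap
        have hl := lenNonneg (ws.getD (r - 1) "")
        rintro ⟨-, hb⟩; omega
      · subst h
        rintro ⟨-, hb⟩; exact hcond' hb
      · have hj' : j < s.length := by omega
        have hec := hhigh j hj' (by omega)
        rw [List.getD_eq_getElem _ _ hj']
        rintro ⟨ha, -⟩; omega

-- ===== VERDICT (by name: the statement is the Claim_ definition above) =====
theorem get_word_indices_spec : Claim_equal_get_word_indices := by
  intro doc offsets _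
  unfold Spec_get_word_indices get_word_indices get_word_indices_alt
  simp only []
  rw [bFold_eq _ [] 0, List.nil_append]
  rw [aFold_eq]
  rw [← findS_eq_bisect, ← findE_eq_bisect]
  cases hS : findS offsets.1 (PySem.Str.split₀ doc) 0 0 <;>
  cases hE : findE offsets.2 (PySem.Str.split₀ doc) 0 0 <;>
  simp [Option.elim]
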